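-- pv_equiv track=rewrite | github.com/ptramsey/star | parser.py | with_next
-- ===== SOURCE A (Python) =====
-- def with_next(iterable):
--     it = iter(iterable)
--     prev = next(it)
--     try:
--         while True:
--             curr = next(it)
--             yield (prev, curr)
--             prev = curr
--
--     except StopIteration:
--         yield (prev, None)
-- ===== SOURCE B (Python) =====
-- def with_next(iterable):
--     items = list(iterable)
--     yield from zip(items, items[1:])
--     yield (items[-1], None)
-- ===== Notes on version B (the rewrite author's own statement) =====
-- stated objective: idiomatic
-- what changed: B materialises the input once and zips it with its own one-step-shifted copy (zip(items, items[1:]) plus a final (last, None)), replacing A's manual prev-variable loop driven by next() and a StopIteration handler.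
import Mathlib
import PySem

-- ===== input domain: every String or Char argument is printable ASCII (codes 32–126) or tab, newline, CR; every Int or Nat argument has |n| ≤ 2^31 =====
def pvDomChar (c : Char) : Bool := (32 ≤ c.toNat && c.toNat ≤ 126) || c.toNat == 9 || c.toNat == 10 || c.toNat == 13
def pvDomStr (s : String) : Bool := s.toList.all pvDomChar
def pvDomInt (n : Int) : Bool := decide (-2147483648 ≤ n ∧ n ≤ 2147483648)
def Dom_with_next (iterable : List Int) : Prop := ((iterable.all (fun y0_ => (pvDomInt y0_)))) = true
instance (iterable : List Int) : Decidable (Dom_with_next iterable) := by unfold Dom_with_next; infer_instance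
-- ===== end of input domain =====

-- B pairs the list with its own shifted copy via zip instead of A's manual prev-variable loop; objective: idiomatic.
-- Both A and B are generators; the equivalence is about the materialised sequence of yielded pairs.


-- ===== PORT A =====
-- A's while-True loop: carry prev, emit (prev, curr) per step, emit (prev, None) at exhaustion.
def withNextGo (prev : Int) (rest : List Int) : List (Int × Option Int) :=
  match rest with
  | [] => [(prev, none)]
  | curr :: t => (prev, some curr) :: withNextGo curr t

def with_next (iterable : List Int) : List (Int × Option Int) :=
  match iterable with
  | [] => []          -- `prev = next(it)` raises here: excluded by Pre_with_next
  | p :: rest => withNextGo p rest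

-- ===== PORT B =====
-- zip(items, items[1:]) then the trailing (items[-1], None); items[-1] via pyGet? (raises on empty, excluded by Pre_).
def with_next_alt (iterable : List Int) : List (Int × Option Int) :=
  ((iterable.zip (iterable.drop 1)).map (fun p => (p.1, some p.2))) ++
    (match PySem.List.pyGet? iterable (-1) with
     | some x => [(x, none)]
     | none => [])

-- ===== PRECONDITION & SPEC =====
-- Both generators raise on the empty input (A: RuntimeError from StopIteration, B: IndexError): excluded.
def Pre_with_next (iterable : List Int) : Prop := iterable ≠ []
instance (iterable : List Int) : Decidable (Pre_with_next iterable) := by unfold Pre_with_next; infer_instance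
def pvWitness_with_next : List Int := [1, 2, 3]

def Spec_with_next (iterable : List Int) (out : List (Int × Option Int)) : Prop := out = with_next_alt iterable
instance (iterable : List Int) (out : List (Int × Option Int)) : Decidable (Spec_with_next iterable out) := by unfold Spec_with_next; infer_instance

-- ===== CLAIM (what is proved, stated in full; the proofs are below) =====
def Claim_equal_with_next : Prop := ∀ (iterable : List Int), Dom_with_next iterable → Pre_with_next iterable → Spec_with_next iterable (with_next iterable)

-- ===== LEMMAS AND PROOFS =====
theorem pyGet_neg_one_cons (p : Int) (rest : List Int) :
    PySem.List.pyGet? (p :: rest) (-1) = some ((p :: rest).getLast (by simp)) := by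
  simp [PySem.List.pyGet?, PySem.List.pyIdx?, List.getLast_eq_getElem]
  rfl

theorem withNextGo_eq (prev : Int) (rest : List Int) :
    withNextGo prev rest =
      (((prev :: rest).zip rest).map (fun p => (p.1, some p.2))) ++
        [((prev :: rest).getLast (by simp), none)] := by
  induction rest generalizing prev with
  | nil => simp [withNextGo]
  | cons c t ih =>
      simp only [withNextGo, ih c, List.zip_cons_cons, List.map_cons, List.cons_append]
      simp [List.getLast_cons]

-- ===== VERDICT (by name: the statement is the Claim_ definition above) =====
theorem with_next_spec : Claim_equal_with_next := by
  intro iterable _ hpre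
  unfold Spec_with_next
  match iterable, hpre with
  | p :: rest, _ =>
    show withNextGo p rest = _
    rw [withNextGo_eq, with_next_alt]
    simp [pyGet_neg_one_cons]
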